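-- pv_equiv track=rewrite | github.com/nobodysshadow/HangmanGame | Python/Lib/library_start.py | initStatus
-- ===== SOURCE A (Python) =====
-- def initStatus(searchWord):
--     """Initialize Status
--
--     Initialize the serach word status string
--
--     Args:
--         searchWord ([string]): the word to guess for the game
--     Returns:
--         [string]: Status string '_ _ _' for 3 letter words
--     """
--     statusString = ""
--     for i in range(1,(len(searchWord)*2)):
--         if i % 2:
--             statusString += "_"
--         else:
--             statusString += " "
--     return statusString
-- ===== SOURCE B (Python) =====
-- def initStatus(searchWord):
--     return " ".join("_" * len(searchWord))
-- ===== Notes on version B (the rewrite author's own statement) =====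
-- stated objective: simpler
-- what changed: Replaces the loop over a doubled index range with a parity branch by the closed-form expression joining a run of underscores with single spaces.
import Mathlib
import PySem

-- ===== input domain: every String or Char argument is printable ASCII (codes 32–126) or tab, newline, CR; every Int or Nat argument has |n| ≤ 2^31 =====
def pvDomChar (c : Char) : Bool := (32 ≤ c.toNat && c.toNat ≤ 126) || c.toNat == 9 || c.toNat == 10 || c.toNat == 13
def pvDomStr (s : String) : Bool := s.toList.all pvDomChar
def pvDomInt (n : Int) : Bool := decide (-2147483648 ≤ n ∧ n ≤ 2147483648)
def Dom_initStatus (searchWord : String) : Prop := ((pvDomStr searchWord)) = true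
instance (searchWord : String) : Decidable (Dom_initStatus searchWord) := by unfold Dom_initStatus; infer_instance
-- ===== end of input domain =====

-- B replaces A's loop over range(1, 2*len) with a parity branch by the closed form " ".join("_" * len(searchWord)); objective: simpler.

-- ===== PORT A =====
-- statusString built char by char over range(1, len(searchWord)*2); "if i % 2:" is Python truthiness (i % 2 ≠ 0)
def initStatus (searchWord : String) : String :=
  String.ofList ((PySem.List.pyRange 1 (PySem.Str.len searchWord * 2) 1).foldl
    (fun acc i => if PySem.Int.mod i 2 ≠ 0 then acc ++ ['_'] else acc ++ [' ']) [])

-- ===== PORT B =====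
-- " ".join("_" * len(searchWord)): joining a string iterates its characters as 1-char strings
def initStatus_alt (searchWord : String) : String :=
  PySem.Str.join " " (List.replicate (PySem.Str.len searchWord).toNat "_")

-- ===== PRECONDITION & SPEC =====
def Spec_initStatus (searchWord : String) (out : String) : Prop := out = initStatus_alt searchWord
instance (searchWord : String) (out : String) : Decidable (Spec_initStatus searchWord out) := by unfold Spec_initStatus; infer_instance

-- ===== CLAIM (what is proved, stated in full; the proofs are below) =====
def Claim_equal_initStatus : Prop := ∀ (searchWord : String), Dom_initStatus searchWord → Spec_initStatus searchWord (initStatus searchWord)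

-- ===== LEMMAS AND PROOFS =====

theorem pvIntercalate_cons_cons (sep x y : List Char) (l : List (List Char)) :
    sep.intercalate (x :: y :: l) = x ++ sep ++ sep.intercalate (y :: l) := by
  simp [List.intercalate, List.intersperse]

-- common shape: '_' then m repetitions of " _"
def pvShape : Nat → List Char
  | 0 => []
  | m + 1 => '_' :: (List.replicate m [' ', '_']).flatten

theorem pvFoldl_eq_shape (n : Nat) :
    (PySem.List.pyRange 1 (2 * (n : Int)) 1).foldl
      (fun acc i => if PySem.Int.mod i 2 ≠ 0 then acc ++ ['_'] else acc ++ [' ']) [] = pvShape n := by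
  induction n with
  | zero => rw [PySem.List.pyRange_one_eq_nil (by omega)]; rfl
  | succ m ih =>
    rcases m with _ | k
    · decide
    · have h1 : (2 : Int) * (k + 1 + 1 : Nat) = (2 * (k + 1 + 1 : Nat) - 1) + 1 := by push_cast; ring
      rw [h1, PySem.List.pyRange_one_succ_right (by push_cast; omega)]
      have h2 : (2 * (k + 1 + 1 : Nat) : Int) - 1 = (2 * (k + 1 : Nat) : Int) + 1 := by push_cast; ring
      rw [h2, PySem.List.pyRange_one_succ_right (by push_cast; omega)]
      rw [List.foldl_append, List.foldl_append, ih]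
      have he : PySem.Int.mod (2 * ((k + 1 : Nat) : Int)) 2 = 0 := by
        rw [PySem.Int.mod_eq_zero_iff_dvd]; exact ⟨_, rfl⟩
      have ho : PySem.Int.mod (2 * ((k + 1 : Nat) : Int) + 1) 2 ≠ 0 := by
        intro hc; rw [PySem.Int.mod_eq_zero_iff_dvd] at hc; omega
      simp only [List.foldl_cons, List.foldl_nil, he, ho, if_pos, if_neg, ne_eq,
        not_true_eq_false, not_false_eq_true]
      show pvShape (k + 1) ++ [' '] ++ ['_'] = pvShape (k + 1 + 1)
      simp only [pvShape, List.replicate_succ' (n := k)]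
      simp

theorem pvJoin_eq_shape (n : Nat) :
    PySem.Chars.join [' '] (List.map String.toList (List.replicate n "_")) = pvShape n := by
  induction n with
  | zero => rfl
  | succ m ih =>
    rcases m with _ | k
    · decide
    · have hr : List.replicate (k + 1 + 1) "_" = "_" :: "_" :: List.replicate k "_" := by
        simp [List.replicate_succ]
      rw [hr, List.map_cons, List.map_cons]
      simp only [PySem.Chars.join] at ih ⊢
      rw [pvIntercalate_cons_cons, ← List.map_cons, ← List.replicate_succ (n := k), ih]
      show '_' :: ' ' :: pvShape (k + 1) = pvShape (k + 1 + 1)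
      simp [pvShape, List.replicate_succ (n := k)]

-- ===== VERDICT (by name: the statement is the Claim_ definition above) =====
theorem initStatus_spec : Claim_equal_initStatus := by
  intro w _
  show initStatus w = initStatus_alt w
  rw [← String.toList_inj]
  simp only [initStatus, initStatus_alt, PySem.Str.toList_join, PySem.Str.len_eq]
  rw [show ((w.toList.length : Int) * 2) = 2 * (w.toList.length : Int) by ring]
  rw [pvFoldl_eq_shape w.toList.length]
  rw [show ((w.toList.length : Int)).toNat = w.toList.length from rfl]
  rw [show (" ".toList) = [' '] from rfl]
  rw [pvJoin_eq_shape w.toList.length]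
  simp
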